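-- pv_equiv track=rewrite | github.com/stevenglasford/bike-map | python_scripts/Hyper/fixer1.py | fix_orphaned_except_blocks
-- ===== SOURCE A (Python) =====
-- from typing import List, Tuple, Dict
--
-- def fix_orphaned_except_blocks(lines: List[str]) -> Tuple[List[str], List[str]]:
--     """Remove orphaned except blocks that were incorrectly inserted"""
--     fixed_lines = []
--     removed_blocks = []
--     i = 0
--
--     while i < len(lines):
--         line = lines[i]
--         stripped = line.strip()
--
--         # Check for auto-generated except blocks that are causing problems
--         if (stripped == 'except Exception as e:' and
--             i + 2 < len(lines) and
--             'logger.warning' in lines[i+1] and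
--             'Unclosed try block' in lines[i+1] and
--             lines[i+2].strip() == 'pass'):
--
--             # This looks like an auto-generated except block
--             # Check if it's properly positioned
--             is_valid_except = False
--
--             # Look backwards for a matching try block
--             for j in range(i-1, max(0, i-10), -1):
--                 prev_line = lines[j].strip()
--                 if prev_line.startswith('try:'):
--                     # Found a try block, check if there's already an except
--                     has_except = False
--                     for k in range(j+1, i):
--                         if lines[k].strip().startswith('except') or lines[k].strip().startswith('finally'):
--                             has_except = True
--                             break
--
--                     if not has_except:
--                         is_valid_except = True
--                     break
--                 elif prev_line.startswith('except') or prev_line.startswith('finally'):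
--                     # Found an existing except/finally, so this one is orphaned
--                     break
--
--             if not is_valid_except:
--                 # Remove the auto-generated except block
--                 removed_blocks.append(f"Lines {i+1}-{i+3}: Auto-generated except block")
--                 i += 3  # Skip the except, logger.warning, and pass lines
--                 continue
--
--         fixed_lines.append(line)
--         i += 1
--
--     return fixed_lines, removed_blocks
-- ===== SOURCE B (Python) =====
-- from typing import List, Tuple
--
-- def _is_orphan(lines: List[str], i: int) -> bool:
--     """True iff lines[i:i+3] looks like an auto-generated except block that is orphaned."""
--     if lines[i].strip() != 'except Exception as e:':
--         return False
--     if i + 2 >= len(lines):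
--         return False
--     if 'logger.warning' not in lines[i + 1] or 'Unclosed try block' not in lines[i + 1]:
--         return False
--     if lines[i + 2].strip() != 'pass':
--         return False
--     # forward scan over the bounded window, remembering the LAST control marker
--     j = -1
--     for t in range(max(1, i - 9), i):
--         if lines[t].strip().startswith(('try:', 'except', 'finally')):
--             j = t
--     if j == -1 or not lines[j].strip().startswith('try:'):
--         return True
--     return any(lines[k].strip().startswith(('except', 'finally'))
--                for k in range(j + 1, i))
--
-- def fix_orphaned_except_blocks(lines: List[str]) -> Tuple[List[str], List[str]]:
--     """Three staged passes: list all orphan candidates, greedily pick non-overlapping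
--     3-line blocks, then rebuild the file from the segments between the picked blocks."""
--     n = len(lines)
--     candidates = [i for i in range(n) if _is_orphan(lines, i)]
--     starts = []
--     last = -3
--     for c in candidates:
--         if c >= last + 3:
--             starts.append(c)
--             last = c
--     removed_blocks = [f"Lines {s+1}-{s+3}: Auto-generated except block" for s in starts]
--     fixed_lines = []
--     prev = 0
--     for s in starts:
--         fixed_lines += lines[prev:s]
--         prev = s + 3
--     fixed_lines += lines[prev:]
--     return fixed_lines, removed_blocks
-- ===== Notes on version B (the rewrite author's own statement) =====
-- stated objective: alternative
-- what changed: B replaces A's single interleaved skip/append loop by three staged passes: a comprehension over ALL indices listing every orphan-pattern candidate (with the bounded backward break-scan replaced by a forward scan that remembers the last control marker), a greedy selection of non-overlapping 3-line blocks from that candidate list, and a reconstruction that concatenates the line segments between the selected blocks instead of appending line by line.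
import Mathlib
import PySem

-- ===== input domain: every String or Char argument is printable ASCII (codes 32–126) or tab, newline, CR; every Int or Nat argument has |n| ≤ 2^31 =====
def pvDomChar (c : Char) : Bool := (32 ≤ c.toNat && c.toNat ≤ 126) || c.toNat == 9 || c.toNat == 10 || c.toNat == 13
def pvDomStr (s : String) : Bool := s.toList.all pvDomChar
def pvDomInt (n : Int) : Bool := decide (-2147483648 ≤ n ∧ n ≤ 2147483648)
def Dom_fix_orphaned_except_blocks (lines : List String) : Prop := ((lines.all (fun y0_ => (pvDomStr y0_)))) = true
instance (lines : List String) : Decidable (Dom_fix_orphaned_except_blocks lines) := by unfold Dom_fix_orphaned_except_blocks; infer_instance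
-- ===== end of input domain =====

-- B restructures A's single interleaved skip/append loop into three staged passes
-- (list all orphan candidates, greedily pick non-overlapping 3-line blocks, rebuild
-- from the segments between them); same cost, a staged decomposition.

-- ===== PORT A =====
-- A's inner 'for k in range(j+1, i)' loop with break, searching an existing except/finally
def pvHasExceptA (lines : List String) : List Int → Bool
  | [] => false
  | k :: rest =>
    if PySem.Str.startswith (PySem.Str.strip (PySem.List.pyGetD lines k "")) "except"
        || PySem.Str.startswith (PySem.Str.strip (PySem.List.pyGetD lines k "")) "finally" then
      true
    else pvHasExceptA lines rest

-- A's backward 'for j in range(i-1, max(0, i-10), -1)' loop; returns is_valid_except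
def pvScanA (lines : List String) (i : Int) : List Int → Bool
  | [] => false
  | j :: rest =>
    let prev := PySem.Str.strip (PySem.List.pyGetD lines j "")
    if PySem.Str.startswith prev "try:" then
      !(pvHasExceptA lines (PySem.List.pyRange (j + 1) i 1))
    else if PySem.Str.startswith prev "except" || PySem.Str.startswith prev "finally" then
      false
    else pvScanA lines i rest

-- A's while loop: interleaved skip/append building fixed_lines directly
def pvLoopA (lines : List String) (i : Nat) (fixed removed : List String) :
    List String × List String :=
  if _h : i < lines.length then
    if (PySem.Str.strip (PySem.List.pyGetD lines (i : Int) "") == "except Exception as e:")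
        && decide ((i : Int) + 2 < (lines.length : Int))
        && PySem.Str.isIn "logger.warning" (PySem.List.pyGetD lines ((i : Int) + 1) "")
        && PySem.Str.isIn "Unclosed try block" (PySem.List.pyGetD lines ((i : Int) + 1) "")
        && (PySem.Str.strip (PySem.List.pyGetD lines ((i : Int) + 2) "") == "pass")
        && !(pvScanA lines (i : Int)
              (PySem.List.pyRange ((i : Int) - 1) (max 0 ((i : Int) - 10)) (-1))) then
      pvLoopA lines (i + 3) fixed
        (removed ++ ["Lines " ++ PySem.Int.toStr ((i : Int) + 1) ++ "-" ++
          PySem.Int.toStr ((i : Int) + 3) ++ ": Auto-generated except block"])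
    else
      pvLoopA lines (i + 1) (fixed ++ [PySem.List.pyGetD lines (i : Int) ""]) removed
  else (fixed, removed)
termination_by lines.length - i

def fix_orphaned_except_blocks (lines : List String) : List String × List String :=
  pvLoopA lines 0 [] []

-- ===== PORT B =====
def pvStarts3 (s : String) : Bool :=
  PySem.Str.startswith s "try:" || PySem.Str.startswith s "except"
    || PySem.Str.startswith s "finally"

def pvStartsEF (s : String) : Bool :=
  PySem.Str.startswith s "except" || PySem.Str.startswith s "finally"

-- Source B's _is_orphan: guard chain, then forward window scan remembering the LAST marker
def pvIsOrphan (lines : List String) (i : Int) : Bool :=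
  if !(PySem.Str.strip (PySem.List.pyGetD lines i "") == "except Exception as e:") then false
  else if decide ((lines.length : Int) ≤ i + 2) then false
  else if !(PySem.Str.isIn "logger.warning" (PySem.List.pyGetD lines (i + 1) "")
      && PySem.Str.isIn "Unclosed try block" (PySem.List.pyGetD lines (i + 1) "")) then false
  else if !(PySem.Str.strip (PySem.List.pyGetD lines (i + 2) "") == "pass") then false
  else
    let j := (PySem.List.pyRange (max 1 (i - 9)) i 1).foldl
      (fun j t => if pvStarts3 (PySem.Str.strip (PySem.List.pyGetD lines t "")) then t else j) (-1)
    if j == (-1) || !(PySem.Str.startswith (PySem.Str.strip (PySem.List.pyGetD lines j "")) "try:") then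
      true
    else
      (PySem.List.pyRange (j + 1) i 1).any
        (fun k => pvStartsEF (PySem.Str.strip (PySem.List.pyGetD lines k "")))

-- Source B's greedy pass: 'for c in candidates: if c >= last + 3: append; last = c'
def pvGreedy : List Int → Int → List Int → List Int
  | [], _, starts => starts
  | c :: rest, last, starts =>
    if last + 3 ≤ c then pvGreedy rest c (starts ++ [c]) else pvGreedy rest last starts

-- Source B's reconstruction: 'for s in starts: fixed += lines[prev:s]; prev = s+3' + tail slice
def pvSeg (lines : List String) : List Int → Int → List String
  | [], prev => PySem.List.slice lines (some prev) none
  | s :: rest, prev => PySem.List.slice lines (some prev) (some s) ++ pvSeg lines rest (s + 3)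

def fix_orphaned_except_blocks_alt (lines : List String) : List String × List String :=
  let candidates := (PySem.List.pyRange 0 (lines.length : Int) 1).filter (pvIsOrphan lines)
  let starts := pvGreedy candidates (-3) []
  let removed := starts.map (fun s => "Lines " ++ PySem.Int.toStr (s + 1) ++ "-" ++
    PySem.Int.toStr (s + 3) ++ ": Auto-generated except block")
  (pvSeg lines starts 0, removed)

-- ===== PRECONDITION & SPEC =====
def Spec_fix_orphaned_except_blocks (lines : List String) (out : List String × List String) : Prop := out = fix_orphaned_except_blocks_alt lines
instance (lines : List String) (out : List String × List String) : Decidable (Spec_fix_orphaned_except_blocks lines out) := by unfold Spec_fix_orphaned_except_blocks; infer_instance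

-- ===== CLAIM (what is proved, stated in full; the proofs are below) =====
def Claim_equal_fix_orphaned_except_blocks : Prop := ∀ (lines : List String), Dom_fix_orphaned_except_blocks lines → Spec_fix_orphaned_except_blocks lines (fix_orphaned_except_blocks lines)

-- ===== LEMMAS AND PROOFS =====

-- A's removal condition at index i, verbatim
def pvCondA (lines : List String) (i : Nat) : Bool :=
  (PySem.Str.strip (PySem.List.pyGetD lines (i : Int) "") == "except Exception as e:")
    && decide ((i : Int) + 2 < (lines.length : Int))
    && PySem.Str.isIn "logger.warning" (PySem.List.pyGetD lines ((i : Int) + 1) "")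
    && PySem.Str.isIn "Unclosed try block" (PySem.List.pyGetD lines ((i : Int) + 1) "")
    && (PySem.Str.strip (PySem.List.pyGetD lines ((i : Int) + 2) "") == "pass")
    && !(pvScanA lines (i : Int)
          (PySem.List.pyRange ((i : Int) - 1) (max 0 ((i : Int) - 10)) (-1)))

-- the start positions A removes at, as a recursion over positions
def pvStartsFrom (lines : List String) (i : Nat) : List Int :=
  if _h : i < lines.length then
    if pvCondA lines i then (i : Int) :: pvStartsFrom lines (i + 3)
    else pvStartsFrom lines (i + 1)
  else []
termination_by lines.length - i

lemma pvStartsFrom_lb (lines : List String) :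
    ∀ (d i : Nat), lines.length - i ≤ d → ∀ s ∈ pvStartsFrom lines i, (i : Int) ≤ s := by
  intro d
  induction d with
  | zero =>
    intro i hd s hs
    rw [pvStartsFrom, dif_neg (by omega)] at hs
    simp at hs
  | succ d ih =>
    intro i hd s hs
    rw [pvStartsFrom] at hs
    by_cases h : i < lines.length
    · rw [dif_pos h] at hs
      split at hs
      · rcases List.mem_cons.mp hs with h' | h'
        · exact le_of_eq h'.symm
        · have := ih (i + 3) (by omega) s h'
          push_cast at this ⊢; omega
      · have := ih (i + 1) (by omega) s hs
        push_cast at this ⊢; omega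
    · rw [dif_neg h] at hs; simp at hs

-- A's inner break loop is List.any
lemma hasExceptA_eq_any (lines : List String) (ks : List Int) :
    pvHasExceptA lines ks = ks.any (fun k =>
      pvStartsEF (PySem.Str.strip (PySem.List.pyGetD lines k ""))) := by
  induction ks with
  | nil => rfl
  | cons k rest ih =>
    simp only [pvHasExceptA, List.any_cons, pvStartsEF]
    split
    · rename_i h; rw [h]; rfl
    · rename_i h
      rw [Bool.not_eq_true] at h
      rw [h, ih, Bool.false_or]
      simp only [pvStartsEF]

-- generic form of A's backward break loop (f = try:, g = except/finally, H = has_except at j)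
def pvScanG (f g H : Int → Bool) : List Int → Bool
  | [] => false
  | j :: rest => if f j then !(H j) else if g j then false else pvScanG f g H rest

lemma scanA_eq_scanG (lines : List String) (i : Int) (js : List Int) :
    pvScanA lines i js =
      pvScanG (fun j => PySem.Str.startswith (PySem.Str.strip (PySem.List.pyGetD lines j "")) "try:")
        (fun j => pvStartsEF (PySem.Str.strip (PySem.List.pyGetD lines j "")))
        (fun j => pvHasExceptA lines (PySem.List.pyRange (j + 1) i 1)) js := by
  induction js with
  | nil => rfl
  | cons j rest ih =>
    simp only [pvScanA, pvScanG]
    rw [ih]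
    simp only [pvStartsEF]

-- the generic break loop against find? followed by B's classification
lemma scanG_eq_find (f g H : Int → Bool) (js : List Int) :
    (!(pvScanG f g H js)) =
      (match js.find? (fun j => f j || g j) with
       | none => true
       | some j => if !(f j) then true else H j) := by
  induction js with
  | nil => rfl
  | cons j rest ih =>
    cases hf : f j with
    | true =>
      rw [List.find?_cons_of_pos (by rw [hf, Bool.true_or])]
      simp [pvScanG, hf]
    | false =>
      cases hg : g j with
      | true =>
        rw [List.find?_cons_of_pos (by rw [hf, hg, Bool.false_or])]
        simp [pvScanG, hf, hg]
      | false =>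
        rw [List.find?_cons_of_neg (by rw [hf, hg]; simp)]
        simp [pvScanG, hf, hg, ih]

-- last-marker fold = find? on the reversed list
lemma foldl_last_eq_find (m : Int → Bool) (l : List Int) (init : Int) :
    l.foldl (fun j t => if m t then t else j) init =
      (match l.reverse.find? m with | some j => j | none => init) := by
  induction l generalizing init with
  | nil => rfl
  | cons t rest ih =>
    rw [List.foldl_cons, ih, List.reverse_cons, List.find?_append]
    cases h : rest.reverse.find? m with
    | some j => simp
    | none =>
      simp only [Option.none_or]
      cases hm : m t <;> simp [List.find?, hm]

-- the window-scan part: B's forward last-marker scan classifies like A's backward break loop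
lemma scanB_eq (lines : List String) (i : Nat) :
    (let j := (PySem.List.pyRange (max 1 ((i : Int) - 9)) (i : Int) 1).foldl
        (fun j t => if pvStarts3 (PySem.Str.strip (PySem.List.pyGetD lines t "")) then t else j) (-1)
     if j == (-1 : Int) || !(PySem.Str.startswith (PySem.Str.strip (PySem.List.pyGetD lines j "")) "try:") then
        true
      else
        (PySem.List.pyRange (j + 1) (i : Int) 1).any
          (fun k => pvStartsEF (PySem.Str.strip (PySem.List.pyGetD lines k "")))) =
    !(pvScanA lines (i : Int) (PySem.List.pyRange ((i : Int) - 1) (max 0 ((i : Int) - 10)) (-1))) := by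
  have hrange : PySem.List.pyRange ((i : Int) - 1) (max 0 ((i : Int) - 10)) (-1) =
      (PySem.List.pyRange (max 1 ((i : Int) - 9)) (i : Int) 1).reverse := by
    have e1 : max 0 ((i : Int) - 10) + 1 = max 1 ((i : Int) - 9) := by omega
    have e2 : (i : Int) - 1 + 1 = (i : Int) := by omega
    rw [PySem.List.pyRange_neg_one_eq_reverse, e1, e2]
  rw [scanA_eq_scanG, scanG_eq_find, hrange,
    foldl_last_eq_find (fun t => pvStarts3 (PySem.Str.strip (PySem.List.pyGetD lines t ""))) _ (-1)]
  have hpred : (fun t => pvStarts3 (PySem.Str.strip (PySem.List.pyGetD lines t ""))) =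
      (fun j => PySem.Str.startswith (PySem.Str.strip (PySem.List.pyGetD lines j "")) "try:"
        || pvStartsEF (PySem.Str.strip (PySem.List.pyGetD lines j ""))) := by
    funext j; simp [pvStarts3, pvStartsEF, Bool.or_assoc]
  rw [hpred]
  cases hfind : (PySem.List.pyRange (max 1 ((i : Int) - 9)) (i : Int) 1).reverse.find?
      (fun j => PySem.Str.startswith (PySem.Str.strip (PySem.List.pyGetD lines j "")) "try:"
        || pvStartsEF (PySem.Str.strip (PySem.List.pyGetD lines j ""))) with
  | none => simp
  | some j =>
    have hjmem : j ∈ (PySem.List.pyRange (max 1 ((i : Int) - 9)) (i : Int) 1).reverse :=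
      List.mem_of_find?_eq_some hfind
    rw [List.mem_reverse, PySem.List.mem_pyRange_one] at hjmem
    have hjne : (j == (-1 : Int)) = false := by
      simp only [beq_eq_false_iff_ne, ne_eq]; omega
    simp only [hjne, Bool.false_or]
    rw [hasExceptA_eq_any]

-- B's detection equals A's inline condition
lemma isOrphan_eq_condA (lines : List String) (i : Nat) :
    pvIsOrphan lines (i : Int) = pvCondA lines i := by
  unfold pvIsOrphan pvCondA
  have hd2 : decide ((lines.length : Int) ≤ (i : Int) + 2) =
      !decide ((i : Int) + 2 < (lines.length : Int)) := by
    rw [← decide_not]; exact decide_eq_decide.mpr (by omega)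
  rw [hd2]
  have hscan := scanB_eq lines i
  generalize (PySem.Str.strip (PySem.List.pyGetD lines (i : Int) "") == "except Exception as e:") = c1
  generalize decide ((i : Int) + 2 < (lines.length : Int)) = c2
  generalize hg3 : PySem.Str.isIn "logger.warning" (PySem.List.pyGetD lines ((i : Int) + 1) "") = c3
  generalize hg4 : PySem.Str.isIn "Unclosed try block" (PySem.List.pyGetD lines ((i : Int) + 1) "") = c4
  generalize hg5 : (PySem.Str.strip (PySem.List.pyGetD lines ((i : Int) + 2) "") == "pass") = c5
  cases c1 <;> cases c2 <;> cases c3 <;> cases c4 <;> cases c5 <;>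
    simp only [Bool.not_true, Bool.not_false, Bool.true_and, Bool.false_and, Bool.and_true,
      Bool.and_false, if_true, if_false, Bool.false_eq_true, ite_self] <;>
    first
      | rfl
      | exact hscan

-- rejected prefix: greedy skips every candidate below last + 3
lemma greedy_skip (p : Int → Bool) (n : Int) :
    ∀ (d : Nat) (i last : Int) (acc : List Int), (last + 3 - i).toNat ≤ d →
      pvGreedy (((PySem.List.pyRange i n 1).filter p)) last acc =
      pvGreedy (((PySem.List.pyRange (max i (last + 3)) n 1).filter p)) last acc := by
  intro d
  induction d with
  | zero =>
    intro i last acc hd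
    simp only [max_eq_left (show last + 3 ≤ i by omega)]
  | succ d ih =>
    intro i last acc hd
    by_cases hle : last + 3 ≤ i
    · simp only [max_eq_left hle]
    · by_cases hn : i < n
      · rw [PySem.List.pyRange_one_cons hn]
        have hmax : max i (last + 3) = max (i + 1) (last + 3) := by omega
        cases hp : p i
        · rw [List.filter_cons_of_neg (by rw [hp]; simp)]
          rw [ih (i + 1) last acc (by omega), ← hmax]
        · rw [List.filter_cons_of_pos (by rw [hp])]
          show pvGreedy (i :: _) last acc = _
          rw [pvGreedy, if_neg (by omega)]
          rw [ih (i + 1) last acc (by omega), ← hmax]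
      · rw [PySem.List.pyRange_one_eq_nil (by omega),
          PySem.List.pyRange_one_eq_nil (by omega)]

-- greedy over the candidate list = A's start recursion
lemma greedy_eq_startsFrom (lines : List String) :
    ∀ (d i : Nat) (last : Int) (acc : List Int), lines.length - i ≤ d → last + 3 ≤ (i : Int) →
      pvGreedy (((PySem.List.pyRange (i : Int) (lines.length : Int) 1).filter (pvIsOrphan lines))) last acc =
      acc ++ pvStartsFrom lines i := by
  intro d
  induction d with
  | zero =>
    intro i last acc hd hlast
    rw [PySem.List.pyRange_one_eq_nil (by exact_mod_cast Nat.le_of_sub_eq_zero (by omega)),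
      pvStartsFrom, dif_neg (by omega)]
    simp [pvGreedy, List.filter_nil]
  | succ d ih =>
    intro i last acc hd hlast
    by_cases h : i < lines.length
    · rw [PySem.List.pyRange_one_cons (by exact_mod_cast h), pvStartsFrom, dif_pos h]
      cases hp : pvCondA lines i
      · rw [List.filter_cons_of_neg (by rw [isOrphan_eq_condA, hp]; simp)]
        have e1 : (i : Int) + 1 = ((i + 1 : Nat) : Int) := by push_cast; ring
        rw [e1, ih (i + 1) last acc (by omega) (by push_cast; omega)]
        simp
      · rw [List.filter_cons_of_pos (by rw [isOrphan_eq_condA, hp])]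
        show pvGreedy ((i : Int) :: _) last acc = _
        rw [pvGreedy, if_pos hlast]
        rw [greedy_skip (pvIsOrphan lines) (lines.length : Int) 3 ((i : Int) + 1) (i : Int)
          (acc ++ [(i : Int)]) (by omega)]
        have e3 : max ((i : Int) + 1) ((i : Int) + 3) = ((i + 3 : Nat) : Int) := by
          push_cast; omega
        rw [e3, ih (i + 3) (i : Int) (acc ++ [(i : Int)]) (by omega) (by push_cast; omega)]
        simp
    · rw [PySem.List.pyRange_one_eq_nil (by exact_mod_cast Nat.le_of_not_lt h),
        pvStartsFrom, dif_neg h]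
      simp [pvGreedy, List.filter_nil]

-- segment reconstruction absorbs one kept line
lemma pvSeg_cons (lines : List String) (i : Nat) (starts : List Int)
    (hi : i < lines.length) (hs : ∀ s ∈ starts, (i : Int) < s) :
    pvSeg lines starts (i : Int) = lines[i] :: pvSeg lines starts ((i : Int) + 1) := by
  cases starts with
  | nil =>
    simp only [pvSeg]
    have e1 : (i : Int) + 1 = ((i + 1 : Nat) : Int) := by push_cast; ring
    rw [e1, PySem.List.slice_from_natCast, PySem.List.slice_from_natCast,
      List.drop_eq_getElem_cons hi]
  | cons s rest =>
    simp only [pvSeg]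
    have hls : (i : Int) < s := hs s (List.mem_cons_self ..)
    have hslice : PySem.List.slice lines (some (i : Int)) (some s) =
        lines[i] :: PySem.List.slice lines (some ((i : Int) + 1)) (some s) := by
      rw [PySem.List.slice_toNat lines (a := (i : Int)) (b := s) (by omega) (by omega),
        PySem.List.slice_toNat lines (a := (i : Int) + 1) (b := s) (by omega) (by omega)]
      have hti : ((i : Int)).toNat = i := by omega
      have hti1 : ((i : Int) + 1).toNat = i + 1 := by omega
      rw [hti, hti1, List.drop_eq_getElem_cons hi]
      have hk : s.toNat - i = (s.toNat - (i + 1)) + 1 := by omega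
      rw [hk, List.take_succ_cons]
    rw [hslice, List.cons_append]

-- main invariant: A's loop = segments over A's start positions
lemma mainInv (lines : List String) :
    ∀ (d i : Nat) (fixed msgs : List String), lines.length - i ≤ d →
      pvLoopA lines i fixed msgs =
        (fixed ++ pvSeg lines (pvStartsFrom lines i) (i : Int),
         msgs ++ (pvStartsFrom lines i).map (fun s => "Lines " ++ PySem.Int.toStr (s + 1) ++ "-" ++
           PySem.Int.toStr (s + 3) ++ ": Auto-generated except block")) := by
  intro d
  induction d with
  | zero =>
    intro i fixed msgs hd
    rw [pvLoopA, dif_neg (by omega), pvStartsFrom, dif_neg (by omega)]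
    simp only [pvSeg, List.map_nil, List.append_nil]
    rw [PySem.List.slice_from_natCast, List.drop_eq_nil_of_le (by omega), List.append_nil]
  | succ d ih =>
    intro i fixed msgs hd
    by_cases h : i < lines.length
    · rw [pvLoopA, dif_pos h, pvStartsFrom, dif_pos h]
      cases hc : pvCondA lines i
      · rw [if_neg (by rw [show ((PySem.Str.strip (PySem.List.pyGetD lines (i : Int) "") == "except Exception as e:")
              && decide ((i : Int) + 2 < (lines.length : Int))
              && PySem.Str.isIn "logger.warning" (PySem.List.pyGetD lines ((i : Int) + 1) "")
              && PySem.Str.isIn "Unclosed try block" (PySem.List.pyGetD lines ((i : Int) + 1) "")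
              && (PySem.Str.strip (PySem.List.pyGetD lines ((i : Int) + 2) "") == "pass")
              && !(pvScanA lines (i : Int)
                    (PySem.List.pyRange ((i : Int) - 1) (max 0 ((i : Int) - 10)) (-1)))) = pvCondA lines i from rfl, hc]; simp)]
        rw [if_neg (by simp)]
        rw [ih (i + 1) (fixed ++ [PySem.List.pyGetD lines (i : Int) ""]) msgs (by omega)]
        have hseg : pvSeg lines (pvStartsFrom lines (i + 1)) (i : Int) =
            lines[i] :: pvSeg lines (pvStartsFrom lines (i + 1)) ((i : Int) + 1) := by
          refine pvSeg_cons lines i _ h (fun s hsmem => ?_)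
          have := pvStartsFrom_lb lines (lines.length) (i + 1) (by omega) s hsmem
          push_cast at this ⊢; omega
        have hline : PySem.List.pyGetD lines (i : Int) "" = lines[i] := by
          simp [PySem.List.pyGetD_natCast, List.getD_eq_getElem?_getD, h]
        have e1 : (i : Int) + 1 = ((i + 1 : Nat) : Int) := by push_cast; ring
        rw [hseg, hline, ← e1]
        simp [List.append_assoc]
      · rw [if_pos (by rw [show ((PySem.Str.strip (PySem.List.pyGetD lines (i : Int) "") == "except Exception as e:")
              && decide ((i : Int) + 2 < (lines.length : Int))
              && PySem.Str.isIn "logger.warning" (PySem.List.pyGetD lines ((i : Int) + 1) "")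
              && PySem.Str.isIn "Unclosed try block" (PySem.List.pyGetD lines ((i : Int) + 1) "")
              && (PySem.Str.strip (PySem.List.pyGetD lines ((i : Int) + 2) "") == "pass")
              && !(pvScanA lines (i : Int)
                    (PySem.List.pyRange ((i : Int) - 1) (max 0 ((i : Int) - 10)) (-1)))) = pvCondA lines i from rfl, hc])]
        rw [if_pos rfl]
        rw [ih (i + 3) fixed (msgs ++ ["Lines " ++ PySem.Int.toStr ((i : Int) + 1) ++ "-" ++
          PySem.Int.toStr ((i : Int) + 3) ++ ": Auto-generated except block"]) (by omega)]
        simp only [pvSeg]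
        have hself : PySem.List.slice lines (some (i : Int)) (some (i : Int)) = [] := by
          rw [PySem.List.slice_toNat lines (a := (i : Int)) (b := (i : Int)) (by omega) (by omega)]
          simp
        have e3 : (i : Int) + 3 = ((i + 3 : Nat) : Int) := by push_cast; ring
        rw [hself, ← e3]
        simp [List.append_assoc]
    · rw [pvLoopA, dif_neg h, pvStartsFrom, dif_neg h]
      simp only [pvSeg, List.map_nil, List.append_nil]
      rw [PySem.List.slice_from_natCast, List.drop_eq_nil_of_le (by omega), List.append_nil]

-- ===== VERDICT (by name: the statement is the Claim_ definition above) =====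
theorem fix_orphaned_except_blocks_spec : Claim_equal_fix_orphaned_except_blocks := by
  intro lines _
  unfold Spec_fix_orphaned_except_blocks fix_orphaned_except_blocks fix_orphaned_except_blocks_alt
  have hg := greedy_eq_startsFrom lines lines.length 0 (-3) [] (by omega) (by omega)
  have hm := mainInv lines lines.length 0 [] [] (by omega)
  simp only [Nat.cast_zero] at hg hm
  rw [hm]
  simp [hg]
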